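-- pv_equiv track=rewrite | github.com/rahulrajaraman/ece143 | sample_bitstring3.py | gather_values
-- ===== SOURCE A (Python) =====
-- def map_bitstring(x):
--     '''
--     Parameters
--     ----------
--     x : list
--         list of bitstrings
--
--     Returns
--     -------
--     Dict
--
--     '''
--     assert isinstance(x,list) ;
--
--     map_bits = dict()
--     for i in x:
--
--         count_zeros = 0
--         count_1 =0
--         for j in i:
--             if j == '0':
--                 count_zeros = count_zeros+1
--             else:
--                 count_1 = count_1+1
--         if count_zeros>count_1:
--             map_bits[i] = 0
--         else:
--             map_bits[i] = 1
--
--     return map_bits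
--
-- def gather_values(x):
--     '''
--     Parameters
--     ----------
--     x : list
--         list of variables as result from samplebitstring 1
--
--     Returns
--     -------
--     value_map : dict
--         says 1/0 from sample bitstring 2 and and creates a list eual to
--         number of times the element is encountered.
--
--     '''
--     assert isinstance(x,list)
--     map_bitstring_dict = map_bitstring(x)
--     assert isinstance(map_bitstring_dict, dict)
--     value_map = dict()
--     for ele in x:
--         val = map_bitstring_dict[ele]
--         value_map.setdefault(ele,[]).append(val)
--
--     return value_map
-- ===== SOURCE B (Python) =====
-- def gather_values(x):
--     assert isinstance(x, list)
--     counts = {}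
--     for ele in x:
--         counts[ele] = counts.get(ele, 0) + 1
--     value_map = {}
--     for key, cnt in counts.items():
--         zeros = sum(1 for ch in key if ch == '0')
--         ones = sum(1 for ch in key if ch != '0')
--         value_map[key] = [0 if zeros > ones else 1] * cnt
--     return value_map
-- ===== Notes on version B (the rewrite author's own statement) =====
-- stated objective: simpler
-- what changed: B builds a frequency dict in one pass, then computes each distinct key's majority label once and emits [label]*count, instead of A's label-dict over all elements followed by per-occurrence setdefault/append.
import Mathlib
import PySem

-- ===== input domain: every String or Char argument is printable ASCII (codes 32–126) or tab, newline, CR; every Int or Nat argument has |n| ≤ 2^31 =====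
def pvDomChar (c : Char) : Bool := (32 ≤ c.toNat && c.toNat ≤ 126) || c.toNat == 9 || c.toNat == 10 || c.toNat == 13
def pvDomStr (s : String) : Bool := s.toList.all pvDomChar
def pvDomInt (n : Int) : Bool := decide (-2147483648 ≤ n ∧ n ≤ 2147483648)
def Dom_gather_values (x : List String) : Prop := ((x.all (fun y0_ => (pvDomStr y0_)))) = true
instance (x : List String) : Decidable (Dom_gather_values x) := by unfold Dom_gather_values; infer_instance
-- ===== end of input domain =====

-- B replaces A's two passes (label dict over all elements, then per-occurrence appends) by a
-- count-first pass: one frequency dict, then one label computation per distinct key and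
-- list-repetition; objective: simpler.

-- ===== PORT A =====
def map_bitstring (x : List String) : PySem.Dict String Int :=
  x.foldl (fun map_bits i =>
    let counts := i.toList.foldl
      (fun (p : Int × Int) j => if j = '0' then (p.1 + 1, p.2) else (p.1, p.2 + 1)) (0, 0)
    if counts.1 > counts.2 then map_bits.insert i 0 else map_bits.insert i 1)
    PySem.Dict.empty

def gather_values (x : List String) : List (String × List Int) :=
  let m := map_bitstring x
  -- m[ele]: the key is always present (ele ∈ x), so getD is exact here
  (x.foldl (fun vm ele =>
      let val := m.getD ele 0
      vm.modify ele [] (fun l => l ++ [val]))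
    PySem.Dict.empty).items

-- ===== PORT B =====
def gather_values_alt (x : List String) : List (String × List Int) :=
  let counts := x.foldl (fun c ele => c.insert ele (c.getD ele 0 + 1)) (PySem.Dict.empty : PySem.Dict String Int)
  (counts.items.foldl (fun vm kc =>
      let zeros : Int := (kc.1.toList.countP (fun ch => ch == '0') : Nat)
      let ones : Int := (kc.1.toList.countP (fun ch => ch != '0') : Nat)
      vm.insert kc.1 (List.replicate kc.2.toNat (if zeros > ones then 0 else 1)))
    PySem.Dict.empty).items

-- ===== PRECONDITION & SPEC =====
def Spec_gather_values (x : List String) (out : List (String × List Int)) : Prop := out = gather_values_alt x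
instance (x : List String) (out : List (String × List Int)) : Decidable (Spec_gather_values x out) := by unfold Spec_gather_values; infer_instance

-- ===== CLAIM (what is proved, stated in full; the proofs are below) =====
def Claim_equal_gather_values : Prop := ∀ (x : List String), Dom_gather_values x → Spec_gather_values x (gather_values x)

-- ===== LEMMAS AND PROOFS =====

-- A's per-string majority label
def labA (s : String) : Int :=
  let counts := s.toList.foldl
    (fun (p : Int × Int) j => if j = '0' then (p.1 + 1, p.2) else (p.1, p.2 + 1)) (0, 0)
  if counts.1 > counts.2 then 0 else 1

-- B's per-string majority label
def labB (s : String) : Int :=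
  let zeros : Int := (s.toList.countP (fun ch => ch == '0') : Nat)
  let ones : Int := (s.toList.countP (fun ch => ch != '0') : Nat)
  if zeros > ones then 0 else 1

theorem labA_step_eq : (fun (p : Int × Int) (j : Char) => if j = '0' then (p.1 + 1, p.2) else (p.1, p.2 + 1))
    = fun (p : Int × Int) (j : Char) => ((if j = '0' then p.1 + 1 else p.1), (if j = '0' then p.2 else p.2 + 1)) := by
  funext p j; split <;> rfl

theorem labA_eq_labB (s : String) : labA s = labB s := by
  simp only [labA, labB, labA_step_eq]
  rw [PySem.List.foldl_prod_mk (f := fun (a : Int) (j : Char) => if j = '0' then a + 1 else a) (g := fun (a : Int) (j : Char) => if j = '0' then a else a + 1)]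
  rw [PySem.List.foldl_ite_add_one (p := fun j => j = '0')]
  rw [show (fun (a : Int) (j : Char) => if j = '0' then a else a + 1) = fun (a : Int) (j : Char) => if (¬ j = '0') then a + 1 else a from by funext a j; split <;> simp_all]
  rw [PySem.List.foldl_ite_add_one (p := fun j => ¬ j = '0')]
  simp only [show (fun (x : Char) => decide (¬ x = '0')) = (fun ch => ch != '0') from by funext c; by_cases h : c = '0' <;> simp [h],
    show (fun (x : Char) => decide (x = '0')) = (fun ch => ch == '0') from by funext c; by_cases h : c = '0' <;> simp [h], zero_add]

theorem map_bitstring_eq (x : List String) :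
    map_bitstring x = x.foldl (fun d i => d.insert i (labA i)) PySem.Dict.empty := by
  unfold map_bitstring
  congr 1
  funext d i
  simp only [labA]
  split <;> rfl

theorem getD_insert_fold (l : List String) (d : PySem.Dict String Int) (k : String) :
    (l.foldl (fun d i => d.insert i (labA i)) d).getD k 0 =
      if k ∈ l then labA k else d.getD k 0 := by
  induction l generalizing d with
  | nil => simp
  | cons h t ih =>
    simp only [List.foldl_cons, ih, PySem.Dict.getD_insert, List.mem_cons]
    by_cases hk : k ∈ t <;> by_cases he : k = h <;> simp [hk, he]

theorem gather_values_items (x : List String) :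
    gather_values x =
      (PySem.Set.ofList x).map (fun k => (k, List.replicate (x.count k) (labA k))) := by
  unfold gather_values
  set m := map_bitstring x with hm
  set vm := x.foldl (fun vm ele => vm.modify ele [] (fun l => l ++ [m.getD ele 0])) PySem.Dict.empty with hvm
  have hkeys : vm.keys = PySem.Set.ofList x := by
    rw [hvm, PySem.Dict.keys_foldl_modify, PySem.Dict.keys_empty, PySem.Set.ofList_eq_foldl]
    rfl
  have hnd : vm.keys.Nodup := by rw [hkeys]; exact PySem.Set.nodup_ofList x
  have hitems := PySem.Dict.items_eq_map_keys vm hnd ([] : List Int)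
  show vm.items = _
  rw [hitems, hkeys]
  refine List.map_congr_left (fun k hk => ?_)
  have hkx : k ∈ x := (PySem.Set.mem_ofList x k).mp hk
  congr 1
  have hmap : vm = (x.map (fun e => (e, m.getD e 0))).foldl (fun d p => d.modify p.1 [] (fun l => l ++ [p.2])) PySem.Dict.empty := by
    rw [hvm, List.foldl_map]
  rw [hmap, PySem.Dict.getD_foldl_modify_append, PySem.Dict.getD_empty, List.nil_append,
    List.filter_map]
  have hfilt : x.filter (((fun p : String × Int => p.1 == k) ∘ fun e => (e, m.getD e 0))) = x.filter (fun e => e == k) := rfl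
  rw [hfilt, List.filter_beq, List.map_map, List.map_replicate]
  have : m.getD k 0 = labA k := by
    rw [hm, map_bitstring_eq, getD_insert_fold]
    simp [hkx]
  simp [this]

theorem gather_values_alt_items (x : List String) :
    gather_values_alt x =
      (PySem.Set.ofList x).map (fun k => (k, List.replicate (x.count k) (labB k))) := by
  have h0 : gather_values_alt x = ((PySem.Dict.counter x).items.foldl
      (fun vm kc => vm.insert kc.1 (List.replicate kc.2.toNat
        (if ((kc.1.toList.countP (fun ch => ch == '0') : Nat) : Int) > ((kc.1.toList.countP (fun ch => ch != '0') : Nat) : Int) then 0 else 1)))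
      PySem.Dict.empty).items := by
    rw [gather_values_alt, PySem.Dict.foldl_insert_getD_add_one_eq_counter]
  have hitems : (PySem.Dict.counter x).items = (PySem.Set.ofList x).map (fun k => (k, (x.count k : Int))) :=
    PySem.Dict.items_counter x
  rw [h0, hitems, List.foldl_map]
  simp only [Int.toNat_natCast]
  have hfresh := PySem.Dict.items_foldl_insert_fresh
    (l := PySem.Set.ofList x) (k := fun e => e)
    (v := fun e => List.replicate (x.count e)
      (if ((e.toList.countP (fun ch => ch == '0') : Nat) : Int) > ((e.toList.countP (fun ch => ch != '0') : Nat) : Int) then (0:Int) else 1))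
    (d := (PySem.Dict.empty : PySem.Dict String (List Int)))
    (fun a _ => PySem.Dict.contains_empty a)
    (by simp only [List.map_id_fun', id]; exact PySem.Set.nodup_ofList x)
  refine Eq.trans hfresh ?_
  rw [show (PySem.Dict.empty : PySem.Dict String (List Int)).items = [] from rfl, List.nil_append]
  simp [labB]

-- ===== VERDICT (by name: the statement is the Claim_ definition above) =====
theorem gather_values_spec : Claim_equal_gather_values := by
  intro x _
  unfold Spec_gather_values
  rw [gather_values_items, gather_values_alt_items]
  exact List.map_congr_left (fun k _ => by rw [labA_eq_labB])
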